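-- pv_equiv track=rewrite | github.com/henriqueconte/Challenges | UVa612.py | DNASort
-- ===== SOURCE A (Python) =====
-- def DNASort ( DNABase, DNAOrder):
--     for i in range(1, len(DNABase)):
--         currentNumber = DNAOrder[i]
--         currentDNA = DNABase[i]
--         while i > 0 and DNAOrder[i-1] > currentNumber:
--             DNAOrder[i] = DNAOrder[i-1]
--             DNABase[i] = DNABase[i-1]
--             i = i-1
--             DNAOrder[i] = currentNumber
--             DNABase[i] = currentDNA
--
--     return DNABase
-- ===== SOURCE B (Python) =====
-- def DNASort(DNABase, DNAOrder):
--     pairs = sorted(zip(DNAOrder, DNABase), key=lambda p: p[0])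
--     DNAOrder[:len(pairs)] = [k for k, _ in pairs]
--     DNABase[:len(pairs)] = [d for _, d in pairs]
--     return DNABase
-- ===== Notes on version B (the rewrite author's own statement) =====
-- stated objective: faster
-- what changed: Replaces the in-place insertion sort (quadratic adjacent-swap sifting over both lists) with one stable library sort (Timsort) of the zipped (key, dna) pairs, written back in a single slice assignment.
import Mathlib
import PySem

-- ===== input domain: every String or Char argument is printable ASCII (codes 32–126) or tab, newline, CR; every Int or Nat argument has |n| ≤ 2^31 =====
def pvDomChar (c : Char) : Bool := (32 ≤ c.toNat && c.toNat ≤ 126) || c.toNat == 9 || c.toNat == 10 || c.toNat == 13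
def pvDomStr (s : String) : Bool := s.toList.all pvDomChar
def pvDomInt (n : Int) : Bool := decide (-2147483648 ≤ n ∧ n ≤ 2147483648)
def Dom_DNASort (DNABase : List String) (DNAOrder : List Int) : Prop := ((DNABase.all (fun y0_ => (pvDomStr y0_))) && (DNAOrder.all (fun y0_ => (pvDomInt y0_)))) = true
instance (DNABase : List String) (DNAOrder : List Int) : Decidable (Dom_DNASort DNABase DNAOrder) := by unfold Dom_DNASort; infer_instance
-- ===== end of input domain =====

-- B replaces A's in-place insertion sort with one stable sort of the zipped (key, dna) pairs (faster).
-- Equivalence proved about the RETURN value; both Pythons also mutate DNABase/DNAOrder (the same way under Pre_).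


-- ===== PORT A =====
-- inner 'while i > 0 and DNAOrder[i-1] > currentNumber': the body writes position i
-- (the old value at i-1), then position i-1 (currentNumber/currentDNA), and decrements i.
def DNASortSift (order : List Int) (base : List String) (i : Nat)
    (cn : Int) (cd : String) : List Int × List String :=
  if h : 0 < i ∧ cn < order.getD (i - 1) 0 then
    DNASortSift ((order.set i (order.getD (i - 1) 0)).set (i - 1) cn)
      ((base.set i (base.getD (i - 1) "")).set (i - 1) cd) (i - 1) cn cd
  else (order, base)
  termination_by i
  decreasing_by omega

def DNASort (DNABase : List String) (DNAOrder : List Int) : List String :=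
  -- for i in range(1, len(DNABase)): sift DNAOrder[i]/DNABase[i] left into the sorted prefix
  (((List.range' 1 (DNABase.length - 1)).foldl
      (fun (st : List Int × List String) i =>
        DNASortSift st.1 st.2 i (st.1.getD i 0) (st.2.getD i "")) (DNAOrder, DNABase))).2

-- ===== PORT B =====
def DNASort_alt (DNABase : List String) (DNAOrder : List Int) : List String :=
  -- pairs = sorted(zip(DNAOrder, DNABase), key=lambda p: p[0])
  let pairs := PySem.List.sorted (DNAOrder.zip DNABase) (fun p => p.1) false
  -- DNABase[:len(pairs)] = [d for _, d in pairs]; return DNABase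
  pairs.map (fun p => p.2) ++ DNABase.drop pairs.length

-- ===== PRECONDITION & SPEC =====
-- Pre_ excludes inputs where DNAOrder is shorter than a DNABase of length ≥ 2:
-- exactly there A raises IndexError (reading DNAOrder[i] for some i ≥ len(DNAOrder)).
def Pre_DNASort (DNABase : List String) (DNAOrder : List Int) : Prop :=
  DNABase.length ≤ DNAOrder.length ∨ DNABase.length ≤ 1
instance (DNABase : List String) (DNAOrder : List Int) : Decidable (Pre_DNASort DNABase DNAOrder) := by unfold Pre_DNASort; infer_instance
def pvWitness_DNASort : List String × List Int := (["AC", "GT", "AA"], [2, 1, 1])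

def Spec_DNASort (DNABase : List String) (DNAOrder : List Int) (out : List String) : Prop := out = DNASort_alt DNABase DNAOrder
instance (DNABase : List String) (DNAOrder : List Int) (out : List String) : Decidable (Spec_DNASort DNABase DNAOrder out) := by unfold Spec_DNASort; infer_instance

-- ===== CLAIM (what is proved, stated in full; the proofs are below) =====
def Claim_equal_DNASort : Prop := ∀ (DNABase : List String) (DNAOrder : List Int), Dom_DNASort DNABase DNAOrder → Pre_DNASort DNABase DNAOrder → Spec_DNASort DNABase DNAOrder (DNASort DNABase DNAOrder)

-- ===== LEMMAS AND PROOFS =====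

-- if p goes strictly before q, inserting into l ++ [q] keeps q last
theorem insertBy_append_singleton {α : Type} (before : α → α → Bool) (p q : α)
    (l : List α) (h : before p q = true) :
    PySem.List.insertBy before p (l ++ [q]) = PySem.List.insertBy before p l ++ [q] := by
  induction l with
  | nil => simp [PySem.List.insertBy, h]
  | cons y ys ih =>
    by_cases hy : before p y = true <;> simp [PySem.List.insertBy, hy, ih]

theorem zip_set {α β : Type} (o : List α) (b : List β) (i : Nat) (v : α) (w : β) :
    (o.set i v).zip (b.set i w) = (o.zip b).set i (v, w) := by
  induction o generalizing b i with
  | nil => simp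
  | cons x xs ih =>
    cases b with
    | nil => simp
    | cons y ys =>
      cases i with
      | zero => simp
      | succ n => simpa using ih ys n

-- the inner while loop inserts the pair p (sitting at index i after a sorted
-- prefix of length i) stably into that prefix, leaving everything else alone
theorem sift_zip (i : Nat) (o : List Int) (b : List String) (p : Int × String)
    (hlen : b.length ≤ o.length) (hi : i < b.length)
    (ho : o.getD i 0 = p.1) (hb : b.getD i "" = p.2)
    (hsort : ((o.zip b).take i).Pairwise (fun a c => a.1 ≤ c.1)) :
    (DNASortSift o b i p.1 p.2).1.length = o.length ∧
    (DNASortSift o b i p.1 p.2).2.length = b.length ∧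
    (DNASortSift o b i p.1 p.2).1.zip (DNASortSift o b i p.1 p.2).2 =
      PySem.List.insertBy (fun a c => decide (a.1 < c.1)) p ((o.zip b).take i)
        ++ (o.zip b).drop (i + 1) := by
  induction i using Nat.strong_induction_on generalizing o b with
  | _ i ih =>
  have hio : i < o.length := lt_of_lt_of_le hi hlen
  have hzlen : (o.zip b).length = b.length := by rw [List.length_zip]; omega
  have hzi : i < (o.zip b).length := by omega
  have hpz : (o.zip b)[i] = p := by
    rw [List.getElem_zip]
    rw [List.getD_eq_getElem o 0 hio] at ho
    rw [List.getD_eq_getElem b "" hi] at hb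
    exact Prod.ext ho hb
  rw [DNASortSift]
  split
  case isTrue h =>
    obtain ⟨hipos, hlt⟩ := h
    have hi1o : i - 1 < o.length := by omega
    have hi1b : i - 1 < b.length := by omega
    have hi1z : i - 1 < (o.zip b).length := by omega
    set q1 := o.getD (i - 1) 0 with hq1
    set q2 := b.getD (i - 1) "" with hq2
    have hqz : (o.zip b)[i - 1] = (q1, q2) := by
      rw [List.getElem_zip, hq1, hq2,
        List.getD_eq_getElem o 0 hi1o, List.getD_eq_getElem b "" hi1b]
    have hzip' : ((o.set i q1).set (i - 1) p.1).zip ((b.set i q2).set (i - 1) p.2)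
        = ((o.zip b).set i (q1, q2)).set (i - 1) p := by
      rw [zip_set, zip_set]
    have htake1 : (((o.zip b).set i (q1, q2)).set (i - 1) p).take (i - 1)
        = (o.zip b).take (i - 1) := by
      rw [List.take_set_of_le (by omega), List.take_set_of_le (by omega)]
    have ih' := ih (i - 1) (by omega)
      ((o.set i q1).set (i - 1) p.1) ((b.set i q2).set (i - 1) p.2)
      (by simpa using hlen) (by simpa using hi1b)
      (by rw [List.getD_eq_getElem _ 0 (by simpa using hi1o)]; simp)
      (by rw [List.getD_eq_getElem _ "" (by simpa using hi1b)]; simp)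
      (by rw [hzip', htake1]
          have hsub : (o.zip b).take (i - 1) = ((o.zip b).take i).take (i - 1) := by
            rw [List.take_take]; congr 1; omega
          rw [hsub]
          exact hsort.sublist (List.take_sublist _ _))
    refine ⟨by simpa using ih'.1, by simpa using ih'.2.1, ?_⟩
    rw [ih'.2.2, hzip', htake1]
    have hdrop : ((((o.zip b)).set i (q1, q2)).set (i - 1) p).drop (i - 1 + 1)
        = (q1, q2) :: (o.zip b).drop (i + 1) := by
      have hii : i - 1 + 1 = i := by omega
      rw [hii, List.drop_set, if_pos (by omega), List.drop_set, if_neg (by omega)]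
      rw [List.drop_eq_getElem_cons hzi, hpz]
      simp
    rw [hdrop]
    have htakei : (o.zip b).take i = (o.zip b).take (i - 1) ++ [(q1, q2)] := by
      conv_lhs => rw [show i = (i - 1) + 1 by omega]
      rw [List.take_add_one, List.getElem?_eq_getElem hi1z, hqz]
      rfl
    rw [htakei, insertBy_append_singleton _ _ _ _ (by simpa using hlt)]
    simp
  case isFalse h =>
    refine ⟨rfl, rfl, ?_⟩
    by_cases hi0 : i = 0
    · subst hi0
      simp only [List.take_zero, PySem.List.insertBy, List.singleton_append]
      have hd := List.drop_eq_getElem_cons hzi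
      simpa [hpz] using hd
    · have hi1o : i - 1 < o.length := by omega
      have hi1z : i - 1 < (o.zip b).length := by omega
      have hle : ((o.zip b)[i - 1]'hi1z).1 ≤ p.1 := by
        have hq : ((o.zip b)[i - 1]'hi1z).1 = o.getD (i - 1) 0 := by
          rw [List.getElem_zip, List.getD_eq_getElem o 0 hi1o]
        rw [hq]
        by_contra hc
        exact h ⟨by omega, by omega⟩
      have htakei : (o.zip b).take i = (o.zip b).take (i - 1) ++ [(o.zip b)[i - 1]] := by
        conv_lhs => rw [show i = (i - 1) + 1 by omega]
        rw [List.take_add_one, List.getElem?_eq_getElem hi1z]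
        rfl
      have hall : ∀ y ∈ (o.zip b).take i,
          (fun (a c : Int × String) => decide (a.1 < c.1)) p y = false := by
        intro y hy
        rw [htakei] at hy
        simp only [List.mem_append, List.mem_singleton] at hy
        have hy1 : y.1 ≤ p.1 := by
          rcases hy with hy | hy
          · have hpair := hsort
            rw [htakei] at hpair
            have hyq := (List.pairwise_append.mp hpair).2.2 y hy _ (List.mem_singleton_self _)
            exact le_trans hyq hle
          · subst hy; exact hle
        simpa using not_lt.mpr hy1
      rw [PySem.List.insertBy_of_forall_not_before _ _ _ hall, List.append_assoc]
      conv_lhs => rw [← List.take_append_drop i (o.zip b)]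
      congr 1
      rw [List.drop_eq_getElem_cons hzi, hpz]
      rfl

-- the outer for-loop invariant: after the iterations i = 1..k, the zipped state is
-- the stable sort of the first k+1 original pairs followed by the untouched rest
theorem dnasort_loop (o₀ : List Int) (b₀ : List String) (hlen : b₀.length ≤ o₀.length) :
    ∀ k, k ≤ b₀.length - 1 →
      (((List.range' 1 k).foldl
          (fun (st : List Int × List String) i =>
            DNASortSift st.1 st.2 i (st.1.getD i 0) (st.2.getD i "")) (o₀, b₀))).1.length = o₀.length ∧
      (((List.range' 1 k).foldl
          (fun (st : List Int × List String) i =>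
            DNASortSift st.1 st.2 i (st.1.getD i 0) (st.2.getD i "")) (o₀, b₀))).2.length = b₀.length ∧
      (((List.range' 1 k).foldl
          (fun (st : List Int × List String) i =>
            DNASortSift st.1 st.2 i (st.1.getD i 0) (st.2.getD i "")) (o₀, b₀))).1.zip
        (((List.range' 1 k).foldl
          (fun (st : List Int × List String) i =>
            DNASortSift st.1 st.2 i (st.1.getD i 0) (st.2.getD i "")) (o₀, b₀))).2 =
        PySem.List.sorted ((o₀.zip b₀).take (k + 1)) (fun p => p.1) false
          ++ (o₀.zip b₀).drop (k + 1) := by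
  have hslen : (o₀.zip b₀).length = b₀.length := by rw [List.length_zip]; omega
  intro k
  induction k with
  | zero =>
    intro _
    refine ⟨by simp, by simp, ?_⟩
    simp only [List.range'_zero, List.foldl_nil]
    cases hs : o₀.zip b₀ with
    | nil => simp [PySem.List.sorted]
    | cons x t => simp [PySem.List.sorted, PySem.List.insertBy]
  | succ k ihk =>
    intro hk
    obtain ⟨h1, h2, h3⟩ := ihk (by omega)
    have hk1 : k + 1 < b₀.length := by omega
    rw [List.range'_concat, show 1 + 1 * k = k + 1 by omega, List.foldl_append,
      List.foldl_cons, List.foldl_nil]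
    set st := ((List.range' 1 k).foldl
      (fun (st : List Int × List String) i =>
        DNASortSift st.1 st.2 i (st.1.getD i 0) (st.2.getD i "")) (o₀, b₀)) with hst
    have hz1 : k + 1 < (o₀.zip b₀).length := by omega
    set p := (o₀.zip b₀)[k + 1] with hp
    have lenA : (PySem.List.sorted ((o₀.zip b₀).take (k + 1)) (fun p => p.1) false).length
        = k + 1 := by
      rw [PySem.List.length_sorted, List.length_take]; omega
    have hz2 : k + 1 < (st.1.zip st.2).length := by rw [List.length_zip, h1, h2]; omega
    have hzst? : (st.1.zip st.2)[k + 1]? = some p := by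
      rw [h3, List.getElem?_append_right (by simp [lenA]), lenA]
      simp [List.getElem?_drop, List.getElem?_eq_getElem hz1, hp]
    have hzst : (st.1.zip st.2)[k + 1]'hz2 = p := by
      rw [List.getElem?_eq_getElem hz2] at hzst?
      exact Option.some.inj hzst?
    have hgz : (st.1[k + 1]'(by rw [h1]; omega), st.2[k + 1]'(by rw [h2]; omega)) = p := by
      rw [← hzst, List.getElem_zip]
    have ho : st.1.getD (k + 1) 0 = p.1 := by
      rw [List.getD_eq_getElem st.1 0 (by rw [h1]; omega), ← hgz]
    have hb : st.2.getD (k + 1) "" = p.2 := by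
      rw [List.getD_eq_getElem st.2 "" (by rw [h2]; omega), ← hgz]
    have htakest : (st.1.zip st.2).take (k + 1)
        = PySem.List.sorted ((o₀.zip b₀).take (k + 1)) (fun p => p.1) false := by
      rw [h3, List.take_left' lenA]
    have hsift := sift_zip (k + 1) st.1 st.2 p (by omega) (by omega) ho hb
      (by rw [htakest]; exact PySem.List.sorted_pairwise _ _)
    rw [ho, hb]
    refine ⟨by rw [hsift.1, h1], by rw [hsift.2.1, h2], ?_⟩
    rw [hsift.2.2, htakest]
    have hdropst : (st.1.zip st.2).drop (k + 1 + 1) = (o₀.zip b₀).drop (k + 2) := by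
      rw [h3, List.drop_append, List.drop_eq_nil_of_le (by rw [lenA]; omega), lenA,
        List.drop_drop]
      simp only [List.nil_append]
      congr 1
      omega
    rw [hdropst]
    have htk : (o₀.zip b₀).take (k + 2) = (o₀.zip b₀).take (k + 1) ++ [p] := by
      rw [show k + 2 = (k + 1) + 1 from rfl, List.take_add_one,
        List.getElem?_eq_getElem hz1]
      rfl
    rw [htk, PySem.List.sorted_eq_foldl_insertBy, PySem.List.sorted_eq_foldl_insertBy,
      List.foldl_append, List.foldl_cons, List.foldl_nil]

-- ===== VERDICT (by name: the statement is the Claim_ definition above) =====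
theorem DNASort_spec : Claim_equal_DNASort := by
  unfold Claim_equal_DNASort
  intro base order _ hpre
  unfold Spec_DNASort DNASort DNASort_alt
  by_cases hml : base.length ≤ order.length
  · by_cases hb0 : base.length = 0
    · have hbe : base = [] := List.length_eq_zero_iff.mp hb0
      subst hbe
      simp [PySem.List.sorted]
    · obtain ⟨h1, h2, h3⟩ := dnasort_loop order base hml (base.length - 1) le_rfl
      have hk1 : base.length - 1 + 1 = base.length := by omega
      have hsl : (order.zip base).length = base.length := by rw [List.length_zip]; omega
      have htk : (order.zip base).take base.length = order.zip base := by
        rw [← hsl]; exact List.take_length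
      have hdk : (order.zip base).drop base.length = [] := by
        rw [← hsl]; exact List.drop_length
      rw [hk1, htk, hdk, List.append_nil] at h3
      set st := ((List.range' 1 (base.length - 1)).foldl
        (fun (st : List Int × List String) i =>
          DNASortSift st.1 st.2 i (st.1.getD i 0) (st.2.getD i "")) (order, base)) with hst
      have hmap : st.2 = List.map Prod.snd (st.1.zip st.2) :=
        (List.map_snd_zip (by rw [h1, h2]; omega)).symm
      rw [hmap, h3]
      show List.map Prod.snd (PySem.List.sorted (order.zip base) (fun p => p.1) false) =
        List.map (fun p => p.2) (PySem.List.sorted (order.zip base) (fun p => p.1) false) ++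
          List.drop (PySem.List.sorted (order.zip base) (fun p => p.1) false).length base
      rw [PySem.List.length_sorted, hsl, List.drop_length, List.append_nil]
  · have hb1 : base.length ≤ 1 := hpre.resolve_left hml
    have ho0 : order = [] := by
      have : order.length = 0 := by omega
      exact List.length_eq_zero_iff.mp this
    subst ho0
    have hr : base.length - 1 = 0 := by omega
    rw [hr]
    simp [PySem.List.sorted]
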